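-- pv_equiv track=rewrite | github.com/Diving-Fish/Chiyuki-Bot | src/routes/fishgame.py | _render_port_buff_description
-- ===== SOURCE A (Python) =====
-- def _render_port_buff_description(template: str, level: int) -> str:
--     if not template:
--         return ""
--     replacements = {
--         "{level}": str(level),
--         "{level * 5}": str(level * 5),
--         "{level * 6}": str(level * 6),
--         "{level * 10}": str(level * 10),
--         "{level * 20}": str(level * 20),
--     }
--     for token, value in replacements.items():
--         template = template.replace(token, value)
--     return template
-- ===== SOURCE B (Python) =====
-- def _render_port_buff_description(template: str, level: int) -> str:
--     # Single fused left-to-right pass over the template (longest token first at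
--     # each position) instead of five full replace passes.
--     out = []
--     i = 0
--     n = len(template)
--     while i < n:
--         if template.startswith("{level * 20}", i):
--             out.append(str(level * 20)); i += 12
--         elif template.startswith("{level * 10}", i):
--             out.append(str(level * 10)); i += 12
--         elif template.startswith("{level * 6}", i):
--             out.append(str(level * 6)); i += 11
--         elif template.startswith("{level * 5}", i):
--             out.append(str(level * 5)); i += 11
--         elif template.startswith("{level}", i):
--             out.append(str(level)); i += 7
--         else:
--             out.append(template[i]); i += 1
--     return "".join(out)
-- ===== Notes on version B (the rewrite author's own statement) =====
-- stated objective: alternative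
-- what changed: Replaces A's five sequential whole-string str.replace passes by one fused left-to-right scan that tries the five literal tokens (longest first) at each position and substitutes in a single pass.
-- outside the precondition, e.g. on _render_port_buff_description('{level * {level}}', 5): A returns '25', B returns '{level * 5}'
import Mathlib
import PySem

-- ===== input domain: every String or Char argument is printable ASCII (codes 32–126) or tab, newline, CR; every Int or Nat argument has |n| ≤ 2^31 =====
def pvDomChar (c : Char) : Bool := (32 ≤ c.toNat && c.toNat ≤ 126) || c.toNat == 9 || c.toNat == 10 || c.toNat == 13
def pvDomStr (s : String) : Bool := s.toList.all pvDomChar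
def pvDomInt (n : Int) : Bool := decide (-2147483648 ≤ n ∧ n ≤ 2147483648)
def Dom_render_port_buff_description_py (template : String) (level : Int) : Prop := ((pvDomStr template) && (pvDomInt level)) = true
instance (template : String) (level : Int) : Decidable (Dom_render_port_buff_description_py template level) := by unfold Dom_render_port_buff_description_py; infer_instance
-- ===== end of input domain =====

set_option maxRecDepth 4096


-- B replaces A's five sequential whole-string replace passes by ONE fused left-to-right
-- scan substituting the five literal tokens (longest first) in a single pass ('alternative').

-- ===== PORT A =====
-- literal transliteration of A: empty guard, a dict of the five tokens (insertion order),
-- then one str.replace pass per dict item.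
def render_port_buff_description_py (template : String) (level : Int) : String :=
  if template = "" then ""
  else
    (((((PySem.Dict.empty.insert "{level}" (PySem.Int.toStr level)).insert
        "{level * 5}" (PySem.Int.toStr (level * 5))).insert
        "{level * 6}" (PySem.Int.toStr (level * 6))).insert
        "{level * 10}" (PySem.Int.toStr (level * 10))).insert
        "{level * 20}" (PySem.Int.toStr (level * 20))).items.foldl
      (fun t p => PySem.Str.replace t p.1 p.2) template

-- ===== PORT B =====
-- B-side helpers: the five literal tokens as char lists
def pvT20 : List Char := ['{','l','e','v','e','l',' ','*',' ','2','0','}']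
def pvT10 : List Char := ['{','l','e','v','e','l',' ','*',' ','1','0','}']
def pvT6  : List Char := ['{','l','e','v','e','l',' ','*',' ','6','}']
def pvT5  : List Char := ['{','l','e','v','e','l',' ','*',' ','5','}']
def pvT1  : List Char := ['{','l','e','v','e','l','}']

-- the single left-to-right scan of Source B (template.startswith(tok, i) = isPrefixOf on the suffix)
def pvScanB (level : Int) : List Char → List Char
  | [] => []
  | c :: t =>
    if List.isPrefixOf pvT20 (c :: t) then PySem.Int.toChars (level * 20) ++ pvScanB level (t.drop 11)
    else if List.isPrefixOf pvT10 (c :: t) then PySem.Int.toChars (level * 10) ++ pvScanB level (t.drop 11)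
    else if List.isPrefixOf pvT6 (c :: t) then PySem.Int.toChars (level * 6) ++ pvScanB level (t.drop 10)
    else if List.isPrefixOf pvT5 (c :: t) then PySem.Int.toChars (level * 5) ++ pvScanB level (t.drop 10)
    else if List.isPrefixOf pvT1 (c :: t) then PySem.Int.toChars level ++ pvScanB level (t.drop 6)
    else c :: pvScanB level t
termination_by l => l.length
decreasing_by all_goals (first | (simp; omega) | simp)

def render_port_buff_description_py_alt (template : String) (level : Int) : String :=
  String.ofList (pvScanB level template.toList)

-- ===== PRECONDITION & SPEC =====
-- Pre_ excludes templates that contain "{level * " directly followed by a new placeholder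
-- opening "{" (possibly after a literal 1 or 2): there A's sequential passes splice the value
-- substituted for an inner placeholder into a later token (chained expansion, e.g.
-- "{level * {level}}" at level 5 becomes "25"), a corner where multi-pass and single-pass
-- template substitution are both defensible and differ.
def Pre_render_port_buff_description_py (template : String) (level : Int) : Prop :=
  PySem.Str.isIn "{level * {" template = false ∧
  PySem.Str.isIn "{level * 1{" template = false ∧
  PySem.Str.isIn "{level * 2{" template = false
instance (template : String) (level : Int) : Decidable (Pre_render_port_buff_description_py template level) := by unfold Pre_render_port_buff_description_py; infer_instance

def pvWitness_render_port_buff_description_py : String × Int := ("Deals {level * 10} dmg, heals {level}.", 3)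

def Spec_render_port_buff_description_py (template : String) (level : Int) (out : String) : Prop := out = render_port_buff_description_py_alt template level
instance (template : String) (level : Int) (out : String) : Decidable (Spec_render_port_buff_description_py template level out) := by unfold Spec_render_port_buff_description_py; infer_instance

-- ===== CLAIM (what is proved, stated in full; the proofs are below) =====
def Claim_equal_render_port_buff_description_py : Prop := ∀ (template : String) (level : Int), Dom_render_port_buff_description_py template level → Pre_render_port_buff_description_py template level → Spec_render_port_buff_description_py template level (render_port_buff_description_py template level)

-- ===== LEMMAS AND PROOFS =====

-- the three forbidden splice patterns, as char lists
def pvBad1 : List Char := ['{','l','e','v','e','l',' ','*',' ','{']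
def pvBad2 : List Char := ['{','l','e','v','e','l',' ','*',' ','1','{']
def pvBad3 : List Char := ['{','l','e','v','e','l',' ','*',' ','2','{']

def pvOK (l : List Char) : Prop := ¬ (pvBad1 <:+: l) ∧ ¬ (pvBad2 <:+: l) ∧ ¬ (pvBad3 <:+: l)

lemma pvOK_of_infix {l' l : List Char} (h : l' <:+: l) (hl : pvOK l) : pvOK l' :=
  ⟨fun h1 => hl.1 (h1.trans h), fun h2 => hl.2.1 (h2.trans h), fun h3 => hl.2.2 (h3.trans h)⟩

-- a clean structural model of CPython str.replace's scan (for nonempty old)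
def pvRep (old nv : List Char) : List Char → List Char
  | [] => []
  | c :: t =>
    if h : old ≠ [] ∧ old.isPrefixOf (c :: t) then nv ++ pvRep old nv ((c :: t).drop old.length)
    else c :: pvRep old nv t
termination_by l => l.length
decreasing_by
  · have : 0 < old.length := List.length_pos_iff.mpr h.1
    simp; omega
  · simp

lemma pvRep_nil (old nv : List Char) : pvRep old nv [] = [] := by simp [pvRep]

lemma pvRep_cons_neg (old nv : List Char) (c : Char) (t : List Char)
    (h : ¬ old <+: (c :: t)) :
    pvRep old nv (c :: t) = c :: pvRep old nv t := by
  rw [pvRep, dif_neg (fun hx => h (List.isPrefixOf_iff_prefix.mp hx.2))]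

lemma pvRep_cons_pos (old nv X : List Char) (h : old ≠ []) :
    pvRep old nv (old ++ X) = nv ++ pvRep old nv X := by
  obtain ⟨o, os, rfl⟩ : ∃ o os, old = o :: os := by
    cases old with | nil => exact absurd rfl h | cons o os => exact ⟨o, os, rfl⟩
  rw [List.cons_append, pvRep, dif_pos ⟨h, List.isPrefixOf_iff_prefix.mpr (by exact ⟨X, by simp⟩)⟩]
  congr 1
  rw [← List.cons_append, List.drop_left]

-- padding: a mismatch strictly inside u persists whatever follows u
lemma pvPrefixPad (old u X : List Char) (hlen : old.length ≤ u.length)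
    (hnpb : old.isPrefixOf u = false) : ¬ old <+: (u ++ X) := by
  have hnp : ¬ old <+: u := fun hc => by
    rw [List.isPrefixOf_iff_prefix.mpr hc] at hnpb; cases hnpb
  intro h
  apply hnp
  have h1 : (u ++ X).take old.length = old := by
    obtain ⟨rest, hrest⟩ := h
    rw [← hrest, List.take_left']; rfl
  have h2 : (u ++ X).take old.length = u.take old.length := by
    rw [List.take_append, Nat.sub_eq_zero_of_le hlen]
    simp
  rw [← h1, h2]
  exact List.take_prefix _ _

lemma pvPrefixPadB (old u X : List Char) (hlen : old.length ≤ u.length)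
    (hnp : old.isPrefixOf u = false) : old.isPrefixOf (u ++ X) = false := by
  cases hb : List.isPrefixOf old (u ++ X) with
  | false => rfl
  | true => exact absurd (List.isPrefixOf_iff_prefix.mp hb) (pvPrefixPad _ _ _ hlen hnp)

-- skipping a block of non-'{' characters (no token can start there)
lemma pvSkipNoBrace (os nv : List Char) (u X : List Char) (hu : ∀ c ∈ u, c ≠ '{') :
    pvRep ('{' :: os) nv (u ++ X) = u ++ pvRep ('{' :: os) nv X := by
  induction u with
  | nil => simp
  | cons a u' ih =>
    have ha : a ≠ '{' := hu a (by simp)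
    rw [List.cons_append, pvRep_cons_neg _ _ _ _
      (fun hpre => ha (List.cons_prefix_cons.mp hpre).1.symm)]
    rw [ih (fun c hc => hu c (by simp [hc])), List.cons_append]

-- skipping a whole non-matching concrete token at the head
lemma pvSkipTok (os0 nv : List Char) (u X : List Char) (hune : u ≠ [])
    (hlen : ('{' :: os0).length ≤ u.length)
    (hnp : ('{' :: os0).isPrefixOf u = false) (hu2 : ∀ c ∈ u.tail, c ≠ '{') :
    pvRep ('{' :: os0) nv (u ++ X) = u ++ pvRep ('{' :: os0) nv X := by
  cases u with
  | nil => exact absurd rfl hune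
  | cons c0 t0 =>
    rw [List.cons_append, pvRep_cons_neg _ _ _ _ (by
      rw [← List.cons_append]
      have hb := pvPrefixPadB _ _ X hlen hnp
      intro hc
      rw [List.isPrefixOf_iff_prefix.mpr hc] at hb
      cases hb)]
    rw [pvSkipNoBrace _ _ _ _ (by simpa using hu2), List.cons_append]

-- characters of str(n): a minus sign or a decimal digit
def pvDD (c : Char) : Bool := c == '-' || c.isDigit

lemma pvDD_ne_lbrace {c : Char} (h : pvDD c = true) : c ≠ '{' := by
  intro rfl_eq; subst rfl_eq; simp [pvDD, Char.isDigit] at h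

lemma pvDigitChar_DD (k : Nat) (hk : k < 10) : pvDD (Nat.digitChar k) = true := by
  interval_cases k <;> decide

lemma pvCore_DD : ∀ (f n : Nat) (acc : List Char), (∀ c ∈ acc, pvDD c = true) →
    ∀ c ∈ Nat.toDigitsCore 10 f n acc, pvDD c = true := by
  intro f
  induction f with
  | zero => intro n acc hacc c hc; exact hacc c (by simpa [Nat.toDigitsCore] using hc)
  | succ f ih =>
    intro n acc hacc c hc
    rw [Nat.toDigitsCore] at hc
    have hd : pvDD (Nat.digitChar (n % 10)) = true := pvDigitChar_DD _ (Nat.mod_lt _ (by norm_num))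
    by_cases h0 : n / 10 = 0
    · rw [if_pos h0] at hc
      rcases List.mem_cons.mp hc with rfl | hc2
      · exact hd
      · exact hacc c hc2
    · rw [if_neg h0] at hc
      exact ih (n / 10) (Nat.digitChar (n % 10) :: acc)
        (by intro d hdm; rcases List.mem_cons.mp hdm with rfl | hdm2
            · exact hd
            · exact hacc d hdm2) c hc

lemma pvCore_ex : ∀ (f n : Nat) (acc : List Char), 0 < f →
    ∃ p, p ≠ [] ∧ Nat.toDigitsCore 10 f n acc = p ++ acc := by
  intro f
  induction f with
  | zero => intro n acc h; omega
  | succ f ih =>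
    intro n acc _
    rw [Nat.toDigitsCore]
    by_cases h0 : n / 10 = 0
    · rw [if_pos h0]; exact ⟨[Nat.digitChar (n % 10)], by simp, rfl⟩
    · rw [if_neg h0]
      cases f with
      | zero =>
        rw [Nat.toDigitsCore]
        exact ⟨[Nat.digitChar (n % 10)], by simp, rfl⟩
      | succ f' =>
        obtain ⟨p, hp, heq⟩ := ih (n / 10) (Nat.digitChar (n % 10) :: acc) (by omega)
        exact ⟨p ++ [Nat.digitChar (n % 10)], by simp, by rw [heq]; simp⟩

lemma pvToChars_ne_nil (n : Int) : PySem.Int.toChars n ≠ [] := by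
  unfold PySem.Int.toChars
  by_cases hn : n < 0
  · rw [if_pos hn]; simp
  · rw [if_neg hn]
    show Nat.toDigitsCore 10 (n.toNat + 1) n.toNat [] ≠ []
    obtain ⟨p, hp, heq⟩ := pvCore_ex (n.toNat + 1) n.toNat [] (by omega)
    rw [heq]; simpa using hp

lemma pvToChars_DD (n : Int) : ∀ c ∈ PySem.Int.toChars n, pvDD c = true := by
  unfold PySem.Int.toChars
  by_cases hn : n < 0
  · rw [if_pos hn]
    intro c hc
    rcases List.mem_cons.mp hc with rfl | hc2
    · decide
    · exact pvCore_DD _ _ [] (by simp) c hc2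
  · rw [if_neg hn]
    intro c hc
    exact pvCore_DD _ _ [] (by simp) c hc

lemma pvToChars_head (n : Int) : ∃ c cs, PySem.Int.toChars n = c :: cs ∧ pvDD c = true := by
  rcases h : PySem.Int.toChars n with _ | ⟨c, cs⟩
  · exact absurd h (pvToChars_ne_nil n)
  · exact ⟨c, cs, rfl, pvToChars_DD n c (by rw [h]; simp)⟩

-- skipping an inserted value block
lemma pvSkipDD (os nv : List Char) (n : Int) (X : List Char) :
    pvRep ('{' :: os) nv (PySem.Int.toChars n ++ X) = PySem.Int.toChars n ++ pvRep ('{' :: os) nv X :=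
  pvSkipNoBrace _ _ _ _ (fun c hc => pvDD_ne_lbrace (pvToChars_DD n c hc))

-- ===== bridging PySem.Chars.replace to pvRep =====
lemma pvGo_spec (old nv : List Char) (hold : old ≠ []) :
    ∀ (fuel : Nat) (l acc : List Char), l.length ≤ fuel →
      PySem.Chars.replace.go old nv fuel l acc = acc.reverse ++ pvRep old nv l := by
  intro fuel
  induction fuel with
  | zero =>
    intro l acc hl
    have hll : l = [] := by cases l with | nil => rfl | cons a t => simp at hl
    subst hll
    simp [PySem.Chars.replace.go, pvRep_nil]
  | succ fuel ih =>
    intro l acc hl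
    cases l with
    | nil => simp [PySem.Chars.replace.go, pvRep_nil]
    | cons c t =>
      rw [PySem.Chars.replace.go]
      have hl' : t.length + 1 ≤ fuel + 1 := by simpa using hl
      by_cases hp : old.isPrefixOf (c :: t)
      · rw [if_pos hp]
        have hlen : 0 < old.length := List.length_pos_iff.mpr hold
        rw [ih (List.drop old.length (c :: t)) (nv.reverse ++ acc) (by simp; omega)]
        rw [pvRep, dif_pos ⟨hold, hp⟩]
        simp
      · rw [if_neg hp]
        rw [ih t (c :: acc) (by omega)]
        rw [pvRep_cons_neg _ _ _ _ (fun hpre => hp (List.isPrefixOf_iff_prefix.mpr hpre))]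
        simp

lemma pvReplace_eq (l old nv : List Char) (hold : old ≠ []) :
    PySem.Chars.replace l old nv = pvRep old nv l := by
  unfold PySem.Chars.replace
  rw [if_neg (by simpa using hold)]
  simpa using pvGo_spec old nv hold l.length l [] le_rfl

lemma pvStrReplace_eq (s o n : String) (h : o.toList ≠ []) :
    PySem.Str.replace s o n = String.ofList (pvRep o.toList n.toList s.toList) := by
  unfold PySem.Str.replace
  rw [pvReplace_eq _ _ _ h]

-- ===== the head-preservation invariant =====
def pvGood (t u : List Char) : Prop :=
  ∀ m : Nat, u.take m = t.take m ∨
    ∃ i w c, i < m ∧ u.take m = t.take i ++ w ∧ w.head? = some c ∧ pvDD c = true ∧ t[i]? = some '{'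

lemma pvGood_refl (t : List Char) : pvGood t t := fun m => Or.inl rfl

lemma pvFront (old nv : List Char) (hold : old ≠ []) :
    ∀ (l : List Char) (m : Nat), (pvRep old nv l).take m = l.take m ∨
      ∃ i, i < m ∧ old.isPrefixOf (l.drop i) = true ∧
        (pvRep old nv l).take m = l.take i ++ (nv ++ pvRep old nv (l.drop (i + old.length))).take (m - i) := by
  intro l
  induction l with
  | nil => intro m; left; rw [pvRep_nil]
  | cons c t ih =>
    intro m
    by_cases hp : old.isPrefixOf (c :: t)
    · cases m with
      | zero => left; simp
      | succ k =>
        right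
        refine ⟨0, by omega, by simpa using hp, ?_⟩
        rw [pvRep, dif_pos ⟨hold, hp⟩]
        simp
    · rw [pvRep_cons_neg _ _ _ _ (fun hpre => hp (List.isPrefixOf_iff_prefix.mpr hpre))]
      cases m with
      | zero => left; simp
      | succ k =>
        rcases ih k with hL | ⟨i, hik, hpre, heq⟩
        · left; simp [List.take_succ_cons, hL]
        · right
          refine ⟨i + 1, by omega, by simpa using hpre, ?_⟩
          have hdd : (c :: t).drop (i + 1 + old.length) = t.drop (i + old.length) := by
            rw [show i + 1 + old.length = (i + old.length) + 1 from by omega]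
            rfl
          rw [hdd]
          simp only [List.take_succ_cons, Nat.succ_sub_succ]
          rw [heq]
          simp

lemma pvGood_step (t u : List Char) (os nv : List Char) (n : Int)
    (hnv : nv = PySem.Int.toChars n) (hg : pvGood t u) : pvGood t (pvRep ('{' :: os) nv u) := by
  intro m
  rcases pvFront ('{' :: os) nv (by simp) u m with hL | ⟨i, him, hpre, heq⟩
  · rw [hL]; exact hg m
  · -- an occurrence of the token starts at position i of u
    have hdrop : ('{' :: os) <+: u.drop i := List.isPrefixOf_iff_prefix.mp hpre
    have hui : u[i]? = some '{' := by
      obtain ⟨rest, hrest⟩ := hdrop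
      rw [← List.head?_drop, ← hrest]; rfl
    have hilen : i < u.length := by
      by_contra hc
      rw [List.drop_eq_nil_iff.mpr (by omega)] at hdrop
      obtain ⟨rest, hrest⟩ := hdrop
      simp at hrest
    obtain ⟨a, nv', hnv'⟩ := pvToChars_head n
    rw [← hnv] at hnv'
    set w := (nv ++ pvRep ('{' :: os) nv (u.drop (i + ('{' :: os).length))).take (m - i) with hw
    have hwh : w.head? = some a := by
      rw [hw, hnv'.1]
      cases hmi : m - i with
      | zero => omega
      | succ k => simp
    rcases hg (i + 1) with hL2 | ⟨i2, w2, c2, hi2, hequ2, hwh2, hdd2, hti2⟩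
    · -- u agrees with t up to i
      have hti : t[i]? = some '{' := by
        have h2 := congrArg (fun (x : List Char) => x[i]?) hL2
        simp only [List.getElem?_take, if_pos (Nat.lt_succ_self i)] at h2
        rw [← h2]; exact hui
      have htk : u.take i = t.take i := by
        have h2 := congrArg (fun (x : List Char) => x.take i) hL2
        simpa [List.take_take] using h2
      exact Or.inr ⟨i, w, a, him, by rw [heq, htk], hwh, hnv'.2, hti⟩
    · -- u was already spliced at i2 ≤ i
      have hti2len : i2 < t.length := by
        by_contra hc
        rw [List.getElem?_eq_none (by omega)] at hti2
        simp at hti2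
      have hlen2 : (t.take i2).length = i2 := by simp; omega
      have hne : i2 ≠ i := by
        intro hii
        subst hii
        have e1 : (u.take (i2 + 1))[i2]? = u[i2]? := by
          rw [List.getElem?_take, if_pos (by omega)]
        have e2 : (t.take i2 ++ w2)[i2]? = w2[0]? := by
          rw [List.getElem?_append_right (by rw [hlen2]), hlen2, Nat.sub_self]
        have e3 : u[i2]? = w2[0]? := by rw [← e1, hequ2, e2]
        rw [hui] at e3
        have e4 : w2.head? = some '{' := by rw [List.head?_eq_getElem?, ← e3]
        rw [hwh2] at e4
        have : c2 = '{' := by simpa using e4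
        subst this
        simp [pvDD, Char.isDigit] at hdd2
      have hi2i : i2 < i := by omega
      obtain ⟨b, w2', hw2'⟩ : ∃ b w2', w2 = b :: w2' := by
        cases w2 with | nil => simp at hwh2 | cons b w2' => exact ⟨b, w2', rfl⟩
      have hutki : u.take i = t.take i2 ++ w2.take (i - i2) := by
        have h1 : (u.take (i + 1)).take i = u.take i := by
          rw [List.take_take]; congr 1; omega
        rw [← h1, hequ2, List.take_append, hlen2,
          List.take_of_length_le (by rw [hlen2]; omega)]
      refine Or.inr ⟨i2, w2.take (i - i2) ++ w, c2, by omega, ?_, ?_, hdd2, hti2⟩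
      · rw [heq, hutki, List.append_assoc]
      · rw [hw2']
        cases hii : i - i2 with
        | zero => omega
        | succ k =>
          simp only [List.take_succ_cons, List.cons_append, List.head?_cons]
          rw [hw2'] at hwh2
          simpa using hwh2

-- under pvOK, no pass can create a token at the head
lemma pvPrefixPad2 (old u X : List Char) (hlen : u.length ≤ old.length)
    (hnpb : (old.take u.length).isPrefixOf u = false) : ¬ old <+: (u ++ X) := by
  have hnp : old.take u.length ≠ u := fun hc => by
    rw [hc, List.isPrefixOf_iff_prefix.mpr (List.prefix_refl u)] at hnpb; cases hnpb
  intro h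
  apply hnp
  obtain ⟨rest, hrest⟩ := h
  have h2 := congrArg (List.take u.length) hrest
  rw [List.take_append, Nat.sub_eq_zero_of_le hlen, List.take_zero, List.append_nil,
    List.take_left] at h2
  exact h2

lemma pvBadPrefix (t : List Char) (i : Nat) (pre bad : List Char)
    (hbad : bad = '{' :: (pre ++ ['{'])) (htk : t.take i = pre)
    (hti : t[i]? = some '{') : bad <+: ('{' :: t) := by
  rcases hd : t.drop i with _ | ⟨x, rest⟩
  · rw [← List.head?_drop, hd] at hti; simp at hti
  · have hx : x = '{' := by rw [← List.head?_drop, hd] at hti; simpa using hti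
    subst hx
    rw [hbad]
    refine List.cons_prefix_cons.mpr ⟨rfl, ⟨rest, ?_⟩⟩
    rw [List.append_assoc, List.singleton_append, ← htk, ← hd, List.take_append_drop]

lemma pvSpawnCase (t u : List Char) (hg : pvGood t u) (T : List Char) (hTu : T <+: u) :
    (T <+: t) ∨ ∃ i c, i < T.length ∧ T[i]? = some c ∧ pvDD c = true ∧
      t.take i = T.take i ∧ t[i]? = some '{' := by
  have htk : u.take T.length = T := by obtain ⟨rest, rfl⟩ := hTu; exact List.take_left
  rcases hg T.length with hL | ⟨i, w, c, hi, hequ, hwh, hdd, hti⟩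
  · left; rw [htk] at hL; rw [hL]; exact List.take_prefix _ _
  · right
    have hieq : T = t.take i ++ w := by rw [← htk, hequ]
    have hilen : i < t.length := (List.getElem?_eq_some_iff.mp hti).1
    have hlen2 : (t.take i).length = i := by simp; omega
    refine ⟨i, c, hi, ?_, hdd, ?_, hti⟩
    · rw [hieq, List.getElem?_append_right (by rw [hlen2]), hlen2, Nat.sub_self,
        ← List.head?_eq_getElem?, hwh]
    · have h3 := congrArg (List.take i) hieq
      rw [List.take_append, hlen2, Nat.sub_self, List.take_zero, List.append_nil,
        List.take_take, Nat.min_self] at h3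
      exact h3.symm

lemma pvNoSpawn (t u : List Char) (hg : pvGood t u) (hP : pvOK ('{' :: t))
    (h0 : ¬ pvT20 <+: ('{' :: t) ∧ ¬ pvT10 <+: ('{' :: t) ∧
          ¬ pvT6 <+: ('{' :: t) ∧ ¬ pvT5 <+: ('{' :: t) ∧ ¬ pvT1 <+: ('{' :: t))
    (tok : List Char)
    (htok : tok = pvT20 ∨ tok = pvT10 ∨ tok = pvT6 ∨ tok = pvT5 ∨ tok = pvT1) :
    ¬ tok <+: ('{' :: u) := by
  intro hpre
  rcases htok with rfl | rfl | rfl | rfl | rfl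
  · -- "{level * 20}"
    have hTu : (['l','e','v','e','l',' ','*',' ','2','0','}'] : List Char) <+: u :=
      (List.cons_prefix_cons.mp hpre).2
    rcases pvSpawnCase t u hg _ hTu with hT | ⟨i, c, hi, hTic, hdd, hTki, hti⟩
    · exact h0.1 (List.cons_prefix_cons.mpr ⟨rfl, hT⟩)
    · simp only [List.length_cons, List.length_nil] at hi
      interval_cases i <;>
        first
        | (simp at hTic; subst hTic; exact absurd hdd (by decide))
        | exact hP.1 ((pvBadPrefix t _ _ pvBad1 (by rfl) hTki hti).isInfix)
        | exact hP.2.2 ((pvBadPrefix t _ _ pvBad3 (by rfl) hTki hti).isInfix)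
  · -- "{level * 10}"
    have hTu : (['l','e','v','e','l',' ','*',' ','1','0','}'] : List Char) <+: u :=
      (List.cons_prefix_cons.mp hpre).2
    rcases pvSpawnCase t u hg _ hTu with hT | ⟨i, c, hi, hTic, hdd, hTki, hti⟩
    · exact h0.2.1 (List.cons_prefix_cons.mpr ⟨rfl, hT⟩)
    · simp only [List.length_cons, List.length_nil] at hi
      interval_cases i <;>
        first
        | (simp at hTic; subst hTic; exact absurd hdd (by decide))
        | exact hP.1 ((pvBadPrefix t _ _ pvBad1 (by rfl) hTki hti).isInfix)
        | exact hP.2.1 ((pvBadPrefix t _ _ pvBad2 (by rfl) hTki hti).isInfix)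
  · -- "{level * 6}"
    have hTu : (['l','e','v','e','l',' ','*',' ','6','}'] : List Char) <+: u :=
      (List.cons_prefix_cons.mp hpre).2
    rcases pvSpawnCase t u hg _ hTu with hT | ⟨i, c, hi, hTic, hdd, hTki, hti⟩
    · exact h0.2.2.1 (List.cons_prefix_cons.mpr ⟨rfl, hT⟩)
    · simp only [List.length_cons, List.length_nil] at hi
      interval_cases i <;>
        first
        | (simp at hTic; subst hTic; exact absurd hdd (by decide))
        | exact hP.1 ((pvBadPrefix t _ _ pvBad1 (by rfl) hTki hti).isInfix)
  · -- "{level * 5}"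
    have hTu : (['l','e','v','e','l',' ','*',' ','5','}'] : List Char) <+: u :=
      (List.cons_prefix_cons.mp hpre).2
    rcases pvSpawnCase t u hg _ hTu with hT | ⟨i, c, hi, hTic, hdd, hTki, hti⟩
    · exact h0.2.2.2.1 (List.cons_prefix_cons.mpr ⟨rfl, hT⟩)
    · simp only [List.length_cons, List.length_nil] at hi
      interval_cases i <;>
        first
        | (simp at hTic; subst hTic; exact absurd hdd (by decide))
        | exact hP.1 ((pvBadPrefix t _ _ pvBad1 (by rfl) hTki hti).isInfix)
  · -- "{level}"
    have hTu : (['l','e','v','e','l','}'] : List Char) <+: u :=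
      (List.cons_prefix_cons.mp hpre).2
    rcases pvSpawnCase t u hg _ hTu with hT | ⟨i, c, hi, hTic, hdd, hTki, hti⟩
    · exact h0.2.2.2.2 (List.cons_prefix_cons.mpr ⟨rfl, hT⟩)
    · simp only [List.length_cons, List.length_nil] at hi
      interval_cases i <;>
        (simp at hTic; subst hTic; exact absurd hdd (by decide))

-- consume / skip wrappers at the concrete tokens
lemma pvCons20 (nv X : List Char) : pvRep pvT20 nv (pvT20 ++ X) = nv ++ pvRep pvT20 nv X := pvRep_cons_pos _ _ _ (by decide)
lemma pvCons10 (nv X : List Char) : pvRep pvT10 nv (pvT10 ++ X) = nv ++ pvRep pvT10 nv X := pvRep_cons_pos _ _ _ (by decide)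
lemma pvCons6 (nv X : List Char) : pvRep pvT6 nv (pvT6 ++ X) = nv ++ pvRep pvT6 nv X := pvRep_cons_pos _ _ _ (by decide)
lemma pvCons5 (nv X : List Char) : pvRep pvT5 nv (pvT5 ++ X) = nv ++ pvRep pvT5 nv X := pvRep_cons_pos _ _ _ (by decide)
lemma pvCons1 (nv X : List Char) : pvRep pvT1 nv (pvT1 ++ X) = nv ++ pvRep pvT1 nv X := pvRep_cons_pos _ _ _ (by decide)

lemma pvSkipDD20 (nv : List Char) (n : Int) (X : List Char) :
    pvRep pvT20 nv (PySem.Int.toChars n ++ X) = PySem.Int.toChars n ++ pvRep pvT20 nv X :=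
  pvSkipDD ['l','e','v','e','l',' ','*',' ','2','0','}'] nv n X
lemma pvSkipDD10 (nv : List Char) (n : Int) (X : List Char) :
    pvRep pvT10 nv (PySem.Int.toChars n ++ X) = PySem.Int.toChars n ++ pvRep pvT10 nv X :=
  pvSkipDD ['l','e','v','e','l',' ','*',' ','1','0','}'] nv n X
lemma pvSkipDD6 (nv : List Char) (n : Int) (X : List Char) :
    pvRep pvT6 nv (PySem.Int.toChars n ++ X) = PySem.Int.toChars n ++ pvRep pvT6 nv X :=
  pvSkipDD ['l','e','v','e','l',' ','*',' ','6','}'] nv n X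
lemma pvSkipDD5 (nv : List Char) (n : Int) (X : List Char) :
    pvRep pvT5 nv (PySem.Int.toChars n ++ X) = PySem.Int.toChars n ++ pvRep pvT5 nv X :=
  pvSkipDD ['l','e','v','e','l',' ','*',' ','5','}'] nv n X

lemma pvSkip1_20 (nv X : List Char) : pvRep pvT1 nv (pvT20 ++ X) = pvT20 ++ pvRep pvT1 nv X :=
  pvSkipTok ['l','e','v','e','l','}'] nv pvT20 X (by decide) (by decide) (by rfl) (by simp [pvT20])
lemma pvSkip1_10 (nv X : List Char) : pvRep pvT1 nv (pvT10 ++ X) = pvT10 ++ pvRep pvT1 nv X :=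
  pvSkipTok ['l','e','v','e','l','}'] nv pvT10 X (by decide) (by decide) (by rfl) (by simp [pvT10])
lemma pvSkip1_6 (nv X : List Char) : pvRep pvT1 nv (pvT6 ++ X) = pvT6 ++ pvRep pvT1 nv X :=
  pvSkipTok ['l','e','v','e','l','}'] nv pvT6 X (by decide) (by decide) (by rfl) (by simp [pvT6])
lemma pvSkip1_5 (nv X : List Char) : pvRep pvT1 nv (pvT5 ++ X) = pvT5 ++ pvRep pvT1 nv X :=
  pvSkipTok ['l','e','v','e','l','}'] nv pvT5 X (by decide) (by decide) (by rfl) (by simp [pvT5])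
lemma pvSkip5_20 (nv X : List Char) : pvRep pvT5 nv (pvT20 ++ X) = pvT20 ++ pvRep pvT5 nv X :=
  pvSkipTok ['l','e','v','e','l',' ','*',' ','5','}'] nv pvT20 X (by decide) (by decide) (by rfl) (by simp [pvT20])
lemma pvSkip5_10 (nv X : List Char) : pvRep pvT5 nv (pvT10 ++ X) = pvT10 ++ pvRep pvT5 nv X :=
  pvSkipTok ['l','e','v','e','l',' ','*',' ','5','}'] nv pvT10 X (by decide) (by decide) (by rfl) (by simp [pvT10])
lemma pvSkip5_6 (nv X : List Char) : pvRep pvT5 nv (pvT6 ++ X) = pvT6 ++ pvRep pvT5 nv X :=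
  pvSkipTok ['l','e','v','e','l',' ','*',' ','5','}'] nv pvT6 X (by decide) (by decide) (by rfl) (by simp [pvT6])
lemma pvSkip6_20 (nv X : List Char) : pvRep pvT6 nv (pvT20 ++ X) = pvT20 ++ pvRep pvT6 nv X :=
  pvSkipTok ['l','e','v','e','l',' ','*',' ','6','}'] nv pvT20 X (by decide) (by decide) (by rfl) (by simp [pvT20])
lemma pvSkip6_10 (nv X : List Char) : pvRep pvT6 nv (pvT10 ++ X) = pvT10 ++ pvRep pvT6 nv X :=
  pvSkipTok ['l','e','v','e','l',' ','*',' ','6','}'] nv pvT10 X (by decide) (by decide) (by rfl) (by simp [pvT10])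
lemma pvSkip10_20 (nv X : List Char) : pvRep pvT10 nv (pvT20 ++ X) = pvT20 ++ pvRep pvT10 nv X :=
  pvSkipTok ['l','e','v','e','l',' ','*',' ','1','0','}'] nv pvT20 X (by decide) (by decide) (by rfl) (by simp [pvT20])

lemma pvStep20 (nv : List Char) (c : Char) (X : List Char) (hc : c ≠ '{') :
    pvRep pvT20 nv (c :: X) = c :: pvRep pvT20 nv X :=
  pvRep_cons_neg _ _ _ _ (fun hp => hc ((List.cons_prefix_cons.mp hp).1).symm)
lemma pvStep10 (nv : List Char) (c : Char) (X : List Char) (hc : c ≠ '{') :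
    pvRep pvT10 nv (c :: X) = c :: pvRep pvT10 nv X :=
  pvRep_cons_neg _ _ _ _ (fun hp => hc ((List.cons_prefix_cons.mp hp).1).symm)
lemma pvStep6 (nv : List Char) (c : Char) (X : List Char) (hc : c ≠ '{') :
    pvRep pvT6 nv (c :: X) = c :: pvRep pvT6 nv X :=
  pvRep_cons_neg _ _ _ _ (fun hp => hc ((List.cons_prefix_cons.mp hp).1).symm)
lemma pvStep5 (nv : List Char) (c : Char) (X : List Char) (hc : c ≠ '{') :
    pvRep pvT5 nv (c :: X) = c :: pvRep pvT5 nv X :=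
  pvRep_cons_neg _ _ _ _ (fun hp => hc ((List.cons_prefix_cons.mp hp).1).symm)
lemma pvStep1 (nv : List Char) (c : Char) (X : List Char) (hc : c ≠ '{') :
    pvRep pvT1 nv (c :: X) = c :: pvRep pvT1 nv X :=
  pvRep_cons_neg _ _ _ _ (fun hp => hc ((List.cons_prefix_cons.mp hp).1).symm)

-- the composed five passes of A, innermost first (dict insertion order)
def pvRepAll (level : Int) (l : List Char) : List Char :=
  pvRep pvT20 (PySem.Int.toChars (level * 20))
    (pvRep pvT10 (PySem.Int.toChars (level * 10))
      (pvRep pvT6 (PySem.Int.toChars (level * 6))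
        (pvRep pvT5 (PySem.Int.toChars (level * 5))
          (pvRep pvT1 (PySem.Int.toChars level) l))))

lemma pvRepAll_nil (level : Int) : pvRepAll level [] = [] := by
  unfold pvRepAll
  rw [pvRep_nil, pvRep_nil, pvRep_nil, pvRep_nil, pvRep_nil]

lemma pvRepAll_t20 (level : Int) (r : List Char) :
    pvRepAll level (pvT20 ++ r) = PySem.Int.toChars (level * 20) ++ pvRepAll level r := by
  unfold pvRepAll
  rw [pvSkip1_20, pvSkip5_20, pvSkip6_20, pvSkip10_20, pvCons20]

lemma pvRepAll_t10 (level : Int) (r : List Char) :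
    pvRepAll level (pvT10 ++ r) = PySem.Int.toChars (level * 10) ++ pvRepAll level r := by
  unfold pvRepAll
  rw [pvSkip1_10, pvSkip5_10, pvSkip6_10, pvCons10, pvSkipDD20]

lemma pvRepAll_t6 (level : Int) (r : List Char) :
    pvRepAll level (pvT6 ++ r) = PySem.Int.toChars (level * 6) ++ pvRepAll level r := by
  unfold pvRepAll
  rw [pvSkip1_6, pvSkip5_6, pvCons6, pvSkipDD10, pvSkipDD20]

lemma pvRepAll_t5 (level : Int) (r : List Char) :
    pvRepAll level (pvT5 ++ r) = PySem.Int.toChars (level * 5) ++ pvRepAll level r := by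
  unfold pvRepAll
  rw [pvSkip1_5, pvCons5, pvSkipDD6, pvSkipDD10, pvSkipDD20]

lemma pvRepAll_t1 (level : Int) (r : List Char) :
    pvRepAll level (pvT1 ++ r) = PySem.Int.toChars level ++ pvRepAll level r := by
  unfold pvRepAll
  rw [pvCons1, pvSkipDD5, pvSkipDD6, pvSkipDD10, pvSkipDD20]

-- evaluation of the scan at the six head shapes
lemma pvScan_nil (level : Int) : pvScanB level [] = [] := by simp [pvScanB]

lemma pvScan_t20 (level : Int) (r : List Char) :
    pvScanB level (pvT20 ++ r) = PySem.Int.toChars (level * 20) ++ pvScanB level r := by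
  have hp : List.isPrefixOf pvT20 ('{'::'l'::'e'::'v'::'e'::'l'::' '::'*'::' '::'2'::'0'::'}'::r) = true :=
    List.isPrefixOf_iff_prefix.mpr ⟨r, rfl⟩
  show pvScanB level ('{'::'l'::'e'::'v'::'e'::'l'::' '::'*'::' '::'2'::'0'::'}'::r) = _
  rw [pvScanB, hp]
  simp

lemma pvScan_t10 (level : Int) (r : List Char) :
    pvScanB level (pvT10 ++ r) = PySem.Int.toChars (level * 10) ++ pvScanB level r := by
  have hp : List.isPrefixOf pvT10 ('{'::'l'::'e'::'v'::'e'::'l'::' '::'*'::' '::'1'::'0'::'}'::r) = true :=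
    List.isPrefixOf_iff_prefix.mpr ⟨r, rfl⟩
  have hn20 : List.isPrefixOf pvT20 ('{'::'l'::'e'::'v'::'e'::'l'::' '::'*'::' '::'1'::'0'::'}'::r) = false := by
    cases hq : List.isPrefixOf pvT20 ('{'::'l'::'e'::'v'::'e'::'l'::' '::'*'::' '::'1'::'0'::'}'::r) with
    | false => rfl
    | true => exact absurd (List.isPrefixOf_iff_prefix.mp hq) (pvPrefixPad pvT20 pvT10 r (by decide) (by rfl))
  show pvScanB level ('{'::'l'::'e'::'v'::'e'::'l'::' '::'*'::' '::'1'::'0'::'}'::r) = _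
  rw [pvScanB, hn20, hp]
  simp

lemma pvScan_t6 (level : Int) (r : List Char) :
    pvScanB level (pvT6 ++ r) = PySem.Int.toChars (level * 6) ++ pvScanB level r := by
  have hp : List.isPrefixOf pvT6 ('{'::'l'::'e'::'v'::'e'::'l'::' '::'*'::' '::'6'::'}'::r) = true :=
    List.isPrefixOf_iff_prefix.mpr ⟨r, rfl⟩
  have hn20 : List.isPrefixOf pvT20 ('{'::'l'::'e'::'v'::'e'::'l'::' '::'*'::' '::'6'::'}'::r) = false := by
    cases hq : List.isPrefixOf pvT20 ('{'::'l'::'e'::'v'::'e'::'l'::' '::'*'::' '::'6'::'}'::r) with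
    | false => rfl
    | true => exact absurd (List.isPrefixOf_iff_prefix.mp hq) (pvPrefixPad2 pvT20 pvT6 r (by decide) (by rfl))
  have hn10 : List.isPrefixOf pvT10 ('{'::'l'::'e'::'v'::'e'::'l'::' '::'*'::' '::'6'::'}'::r) = false := by
    cases hq : List.isPrefixOf pvT10 ('{'::'l'::'e'::'v'::'e'::'l'::' '::'*'::' '::'6'::'}'::r) with
    | false => rfl
    | true => exact absurd (List.isPrefixOf_iff_prefix.mp hq) (pvPrefixPad2 pvT10 pvT6 r (by decide) (by rfl))
  show pvScanB level ('{'::'l'::'e'::'v'::'e'::'l'::' '::'*'::' '::'6'::'}'::r) = _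
  rw [pvScanB, hn20, hn10, hp]
  simp

lemma pvScan_t5 (level : Int) (r : List Char) :
    pvScanB level (pvT5 ++ r) = PySem.Int.toChars (level * 5) ++ pvScanB level r := by
  have hp : List.isPrefixOf pvT5 ('{'::'l'::'e'::'v'::'e'::'l'::' '::'*'::' '::'5'::'}'::r) = true :=
    List.isPrefixOf_iff_prefix.mpr ⟨r, rfl⟩
  have hn20 : List.isPrefixOf pvT20 ('{'::'l'::'e'::'v'::'e'::'l'::' '::'*'::' '::'5'::'}'::r) = false := by
    cases hq : List.isPrefixOf pvT20 ('{'::'l'::'e'::'v'::'e'::'l'::' '::'*'::' '::'5'::'}'::r) with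
    | false => rfl
    | true => exact absurd (List.isPrefixOf_iff_prefix.mp hq) (pvPrefixPad2 pvT20 pvT5 r (by decide) (by rfl))
  have hn10 : List.isPrefixOf pvT10 ('{'::'l'::'e'::'v'::'e'::'l'::' '::'*'::' '::'5'::'}'::r) = false := by
    cases hq : List.isPrefixOf pvT10 ('{'::'l'::'e'::'v'::'e'::'l'::' '::'*'::' '::'5'::'}'::r) with
    | false => rfl
    | true => exact absurd (List.isPrefixOf_iff_prefix.mp hq) (pvPrefixPad2 pvT10 pvT5 r (by decide) (by rfl))
  have hn6 : List.isPrefixOf pvT6 ('{'::'l'::'e'::'v'::'e'::'l'::' '::'*'::' '::'5'::'}'::r) = false := by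
    cases hq : List.isPrefixOf pvT6 ('{'::'l'::'e'::'v'::'e'::'l'::' '::'*'::' '::'5'::'}'::r) with
    | false => rfl
    | true => exact absurd (List.isPrefixOf_iff_prefix.mp hq) (pvPrefixPad pvT6 pvT5 r (by decide) (by rfl))
  show pvScanB level ('{'::'l'::'e'::'v'::'e'::'l'::' '::'*'::' '::'5'::'}'::r) = _
  rw [pvScanB, hn20, hn10, hn6, hp]
  simp

lemma pvScan_t1 (level : Int) (r : List Char) :
    pvScanB level (pvT1 ++ r) = PySem.Int.toChars level ++ pvScanB level r := by
  have hp : List.isPrefixOf pvT1 ('{'::'l'::'e'::'v'::'e'::'l'::'}'::r) = true :=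
    List.isPrefixOf_iff_prefix.mpr ⟨r, rfl⟩
  have hn20 : List.isPrefixOf pvT20 ('{'::'l'::'e'::'v'::'e'::'l'::'}'::r) = false := by
    cases hq : List.isPrefixOf pvT20 ('{'::'l'::'e'::'v'::'e'::'l'::'}'::r) with
    | false => rfl
    | true => exact absurd (List.isPrefixOf_iff_prefix.mp hq) (pvPrefixPad2 pvT20 pvT1 r (by decide) (by rfl))
  have hn10 : List.isPrefixOf pvT10 ('{'::'l'::'e'::'v'::'e'::'l'::'}'::r) = false := by
    cases hq : List.isPrefixOf pvT10 ('{'::'l'::'e'::'v'::'e'::'l'::'}'::r) with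
    | false => rfl
    | true => exact absurd (List.isPrefixOf_iff_prefix.mp hq) (pvPrefixPad2 pvT10 pvT1 r (by decide) (by rfl))
  have hn6 : List.isPrefixOf pvT6 ('{'::'l'::'e'::'v'::'e'::'l'::'}'::r) = false := by
    cases hq : List.isPrefixOf pvT6 ('{'::'l'::'e'::'v'::'e'::'l'::'}'::r) with
    | false => rfl
    | true => exact absurd (List.isPrefixOf_iff_prefix.mp hq) (pvPrefixPad2 pvT6 pvT1 r (by decide) (by rfl))
  have hn5 : List.isPrefixOf pvT5 ('{'::'l'::'e'::'v'::'e'::'l'::'}'::r) = false := by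
    cases hq : List.isPrefixOf pvT5 ('{'::'l'::'e'::'v'::'e'::'l'::'}'::r) with
    | false => rfl
    | true => exact absurd (List.isPrefixOf_iff_prefix.mp hq) (pvPrefixPad2 pvT5 pvT1 r (by decide) (by rfl))
  show pvScanB level ('{'::'l'::'e'::'v'::'e'::'l'::'}'::r) = _
  rw [pvScanB, hn20, hn10, hn6, hn5, hp]
  simp

lemma pvScan_char (level : Int) (c : Char) (t : List Char)
    (h20 : ¬ pvT20 <+: (c :: t)) (h10 : ¬ pvT10 <+: (c :: t)) (h6 : ¬ pvT6 <+: (c :: t))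
    (h5 : ¬ pvT5 <+: (c :: t)) (h1 : ¬ pvT1 <+: (c :: t)) :
    pvScanB level (c :: t) = c :: pvScanB level t := by
  rw [pvScanB,
    if_neg (fun hb => h20 (List.isPrefixOf_iff_prefix.mp hb)),
    if_neg (fun hb => h10 (List.isPrefixOf_iff_prefix.mp hb)),
    if_neg (fun hb => h6 (List.isPrefixOf_iff_prefix.mp hb)),
    if_neg (fun hb => h5 (List.isPrefixOf_iff_prefix.mp hb)),
    if_neg (fun hb => h1 (List.isPrefixOf_iff_prefix.mp hb))]

lemma pvMain (level : Int) : ∀ (l : List Char), pvOK l → pvRepAll level l = pvScanB level l := by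
  have H : ∀ (nb : Nat) (l : List Char), l.length ≤ nb → pvOK l →
      pvRepAll level l = pvScanB level l := by
    intro nb
    induction nb with
    | zero =>
      intro l hl _
      have hnil : l = [] := by cases l with | nil => rfl | cons a t => simp at hl
      subst hnil
      rw [pvRepAll_nil, pvScan_nil]
    | succ nb ih =>
      intro l hl hok
      by_cases h20 : pvT20 <+: l
      · obtain ⟨r, rfl⟩ := h20
        have hr : r.length ≤ nb := by simp [pvT20] at hl; omega
        rw [pvRepAll_t20, pvScan_t20,
          ih r hr (pvOK_of_infix (List.suffix_append pvT20 r).isInfix hok)]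
      · by_cases h10 : pvT10 <+: l
        · obtain ⟨r, rfl⟩ := h10
          have hr : r.length ≤ nb := by simp [pvT10] at hl; omega
          rw [pvRepAll_t10, pvScan_t10,
            ih r hr (pvOK_of_infix (List.suffix_append pvT10 r).isInfix hok)]
        · by_cases h6 : pvT6 <+: l
          · obtain ⟨r, rfl⟩ := h6
            have hr : r.length ≤ nb := by simp [pvT6] at hl; omega
            rw [pvRepAll_t6, pvScan_t6,
              ih r hr (pvOK_of_infix (List.suffix_append pvT6 r).isInfix hok)]
          · by_cases h5 : pvT5 <+: l
            · obtain ⟨r, rfl⟩ := h5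
              have hr : r.length ≤ nb := by simp [pvT5] at hl; omega
              rw [pvRepAll_t5, pvScan_t5,
                ih r hr (pvOK_of_infix (List.suffix_append pvT5 r).isInfix hok)]
            · by_cases h1 : pvT1 <+: l
              · obtain ⟨r, rfl⟩ := h1
                have hr : r.length ≤ nb := by simp [pvT1] at hl; omega
                rw [pvRepAll_t1, pvScan_t1,
                  ih r hr (pvOK_of_infix (List.suffix_append pvT1 r).isInfix hok)]
              · cases l with
                | nil => rw [pvRepAll_nil, pvScan_nil]
                | cons c tl =>
                  have hr : tl.length ≤ nb := by simp at hl; omega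
                  have hoktl : pvOK tl := pvOK_of_infix (List.suffix_cons c tl).isInfix hok
                  rw [pvScan_char level c tl h20 h10 h6 h5 h1]
                  by_cases hc : c = '{'
                  · subst hc
                    have h0 : ¬ pvT20 <+: ('{' :: tl) ∧ ¬ pvT10 <+: ('{' :: tl) ∧
                        ¬ pvT6 <+: ('{' :: tl) ∧ ¬ pvT5 <+: ('{' :: tl) ∧ ¬ pvT1 <+: ('{' :: tl) :=
                      ⟨h20, h10, h6, h5, h1⟩
                    have g1 : pvGood tl (pvRep pvT1 (PySem.Int.toChars level) tl) :=
                      pvGood_step tl tl ['l','e','v','e','l','}'] _ level rfl (pvGood_refl tl)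
                    have h5' := pvNoSpawn tl _ g1 hok h0 pvT5 (by tauto)
                    have g2 : pvGood tl (pvRep pvT5 (PySem.Int.toChars (level * 5))
                        (pvRep pvT1 (PySem.Int.toChars level) tl)) :=
                      pvGood_step tl _ ['l','e','v','e','l',' ','*',' ','5','}'] _ (level * 5) rfl g1
                    have h6' := pvNoSpawn tl _ g2 hok h0 pvT6 (by tauto)
                    have g3 : pvGood tl (pvRep pvT6 (PySem.Int.toChars (level * 6))
                        (pvRep pvT5 (PySem.Int.toChars (level * 5))
                          (pvRep pvT1 (PySem.Int.toChars level) tl))) :=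
                      pvGood_step tl _ ['l','e','v','e','l',' ','*',' ','6','}'] _ (level * 6) rfl g2
                    have h10' := pvNoSpawn tl _ g3 hok h0 pvT10 (by tauto)
                    have g4 : pvGood tl (pvRep pvT10 (PySem.Int.toChars (level * 10))
                        (pvRep pvT6 (PySem.Int.toChars (level * 6))
                          (pvRep pvT5 (PySem.Int.toChars (level * 5))
                            (pvRep pvT1 (PySem.Int.toChars level) tl)))) :=
                      pvGood_step tl _ ['l','e','v','e','l',' ','*',' ','1','0','}'] _ (level * 10) rfl g3
                    have h20' := pvNoSpawn tl _ g4 hok h0 pvT20 (by tauto)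
                    have step : pvRepAll level ('{' :: tl) = '{' :: pvRepAll level tl := by
                      unfold pvRepAll
                      rw [pvRep_cons_neg _ _ _ _ h1, pvRep_cons_neg _ _ _ _ h5',
                        pvRep_cons_neg _ _ _ _ h6', pvRep_cons_neg _ _ _ _ h10',
                        pvRep_cons_neg _ _ _ _ h20']
                    rw [step, ih tl hr hoktl]
                  · have step : pvRepAll level (c :: tl) = c :: pvRepAll level tl := by
                      unfold pvRepAll
                      rw [pvStep1 _ _ _ hc, pvStep5 _ _ _ hc, pvStep6 _ _ _ hc,
                        pvStep10 _ _ _ hc, pvStep20 _ _ _ hc]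
                    rw [step, ih tl hr hoktl]
  exact fun l => H l.length l le_rfl

-- ===== assembling the two ports =====
lemma pvItems (level : Int) :
    (((((PySem.Dict.empty.insert "{level}" (PySem.Int.toStr level)).insert
        "{level * 5}" (PySem.Int.toStr (level * 5))).insert
        "{level * 6}" (PySem.Int.toStr (level * 6))).insert
        "{level * 10}" (PySem.Int.toStr (level * 10))).insert
        "{level * 20}" (PySem.Int.toStr (level * 20))).items =
      [("{level}", PySem.Int.toStr level), ("{level * 5}", PySem.Int.toStr (level * 5)),
       ("{level * 6}", PySem.Int.toStr (level * 6)), ("{level * 10}", PySem.Int.toStr (level * 10)),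
       ("{level * 20}", PySem.Int.toStr (level * 20))] := rfl

-- ===== VERDICT (by name: the statement is the Claim_ definition above) =====
theorem render_port_buff_description_py_spec : Claim_equal_render_port_buff_description_py := by
  intro template level _hdom hpre
  unfold Spec_render_port_buff_description_py
  obtain ⟨hp1, hp2, hp3⟩ := hpre
  have hb1 : PySem.Chars.isIn pvBad1 template.toList = false := hp1
  have hb2 : PySem.Chars.isIn pvBad2 template.toList = false := hp2
  have hb3 : PySem.Chars.isIn pvBad3 template.toList = false := hp3
  have hok : pvOK template.toList :=
    ⟨(PySem.Chars.isIn_eq_false_iff _ _).mp hb1, (PySem.Chars.isIn_eq_false_iff _ _).mp hb2,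
     (PySem.Chars.isIn_eq_false_iff _ _).mp hb3⟩
  unfold render_port_buff_description_py render_port_buff_description_py_alt
  by_cases hT : template = ""
  · rw [if_pos hT, hT]
    show ("" : String) = String.ofList (pvScanB level ("" : String).toList)
    rw [show ("" : String).toList = ([] : List Char) from rfl, pvScan_nil]
  · rw [if_neg hT, pvItems]
    simp only [List.foldl_cons, List.foldl_nil]
    rw [pvStrReplace_eq _ _ _ (by simp), pvStrReplace_eq _ _ _ (by simp),
      pvStrReplace_eq _ _ _ (by simp), pvStrReplace_eq _ _ _ (by simp),
      pvStrReplace_eq _ _ _ (by simp)]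
    simp only [String.toList_ofList, PySem.Int.toList_toStr]
    show String.ofList (pvRepAll level template.toList) = _
    rw [pvMain level template.toList hok]
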